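-- pv_equiv track=rewrite | github.com/Bobcatsoap/jy-server | cell/RoomType6PassiveFindCards.py | is_2_l_d
-- ===== SOURCE A (Python) =====
-- import copy
--
-- def is_2_l_d(cards):
--     if len(cards) < 6:
--         return False
--     if len(cards) % 2 != 0:
--         return False
--     for card in cards:
--         if cards.count(card) != 2:
--             return False
--     new_cards = copy.deepcopy(cards)
--     new_cards.sort()
--     # 去重
--     for card in new_cards:
--         while new_cards.count(card) != 1:
--             new_cards.remove(card)
--     # 不能包含大小王和 2
--     if new_cards[len(new_cards) - 1] >= 15:
--         return False
--
--     for index in range(0, len(new_cards) - 1):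
--         if not new_cards[index] + 1 == new_cards[index + 1]:
--             return False
--     return True
-- ===== SOURCE B (Python) =====
-- def is_2_l_d(cards):
--     # Count-map + range-cardinality test instead of sort/dedup/adjacent scan.
--     if len(cards) < 6 or len(cards) % 2 != 0:
--         return False
--     cnt = {}
--     for c in cards:
--         cnt[c] = cnt.get(c, 0) + 1
--     if any(v != 2 for v in cnt.values()):
--         return False
--     lo = min(cnt)
--     hi = max(cnt)
--     if hi >= 15:
--         return False
--     return hi - lo + 1 == len(cnt)
-- ===== Notes on version B (the rewrite author's own statement) =====
-- stated objective: simpler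
-- what changed: Replaces A's per-element count scans, sort, in-place dedup-by-repeated-remove and adjacent-pair scan by one pass building a count map, then min/max of the distinct keys and the range-cardinality identity hi-lo+1 == number of distinct values.
import Mathlib
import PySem

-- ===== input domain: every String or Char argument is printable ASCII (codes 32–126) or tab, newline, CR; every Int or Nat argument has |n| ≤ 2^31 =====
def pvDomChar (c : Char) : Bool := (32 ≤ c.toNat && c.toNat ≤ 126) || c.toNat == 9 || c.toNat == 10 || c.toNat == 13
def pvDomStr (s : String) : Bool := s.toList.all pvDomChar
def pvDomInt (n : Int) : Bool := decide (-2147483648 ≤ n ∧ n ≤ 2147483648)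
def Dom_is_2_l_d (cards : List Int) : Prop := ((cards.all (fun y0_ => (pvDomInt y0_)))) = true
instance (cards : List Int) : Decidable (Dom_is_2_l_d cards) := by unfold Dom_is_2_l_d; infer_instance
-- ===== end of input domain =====

-- B replaces A's sort + in-place dedup + adjacent scan by a single count-map pass and the
-- range-cardinality identity (max-min+1 = number of distinct values); same return value everywhere.

-- ===== PORT A =====
-- inner 'while new_cards.count(card) != 1: new_cards.remove(card)'; fuel = list length bounds the
-- iterations (each remove shortens the list); '.getD l' is unreachable (card is taken from l, so
-- remove? succeeds whenever the loop body runs).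
def pvDedupWhile : Nat → List Int → Int → List Int
  | 0, l, _ => l
  | f + 1, l, c => if l.count c ≠ 1 then pvDedupWhile f ((PySem.List.remove? l c).getD l) c else l

-- outer 'for card in new_cards': Python iterates by index over the list it is mutating; fuel
-- (initial length + 1) bounds the iterations since the list only shrinks and the index grows.
def pvDedupLoop : Nat → Nat → List Int → List Int
  | 0, _, l => l
  | f + 1, i, l =>
    match l[i]? with
    | none => l
    | some c => pvDedupLoop f (i + 1) (pvDedupWhile l.length l c)

def is_2_l_d (cards : List Int) : Bool :=
  if cards.length < 6 then false
  else if cards.length % 2 ≠ 0 then false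
  else if ¬ (cards.all fun card => cards.count card == 2) then false
  else
    let new_cards := PySem.List.sorted cards (fun x => x) false
    let d := pvDedupLoop (new_cards.length + 1) 0 new_cards
    -- new_cards[len(new_cards) - 1]: in range here (cards is nonempty), so '.getD 0' is unreachable
    if (PySem.List.pyGet? d ((d.length : Int) - 1)).getD 0 ≥ 15 then false
    else
      (PySem.List.pyRange 0 ((d.length : Int) - 1) 1).all fun idx =>
        (PySem.List.pyGet? d idx).getD 0 + 1 == (PySem.List.pyGet? d (idx + 1)).getD 0

-- ===== PORT B =====
def is_2_l_d_alt (cards : List Int) : Bool :=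
  if cards.length < 6 || cards.length % 2 != 0 then false
  else
    let cnt := cards.foldl (fun d c => d.insert c (d.getD c 0 + 1)) (PySem.Dict.empty : PySem.Dict Int Int)
    if cnt.values.any (fun v => v != 2) then false
    else
      -- min(cnt) / max(cnt): cnt is nonempty here (len(cards) >= 6), so the 'none' arm is unreachable
      match PySem.List.min? cnt.keys (fun x => x), PySem.List.max? cnt.keys (fun x => x) with
      | some lo, some hi =>
        if hi ≥ 15 then false
        else decide (hi - lo + 1 = (cnt.size : Int))
      | _, _ => false

-- ===== PRECONDITION & SPEC =====
def Spec_is_2_l_d (cards : List Int) (out : Bool) : Prop := out = is_2_l_d_alt cards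
instance (cards : List Int) (out : Bool) : Decidable (Spec_is_2_l_d cards out) := by unfold Spec_is_2_l_d; infer_instance

-- ===== CLAIM (what is proved, stated in full; the proofs are below) =====
def Claim_equal_is_2_l_d : Prop := ∀ (cards : List Int), Dom_is_2_l_d cards → Spec_is_2_l_d cards (is_2_l_d cards)

-- ===== LEMMAS AND PROOFS =====

-- each distinct value doubled, in order
def pvDup (s : List Int) : List Int := s.flatMap fun a => [a, a]

theorem pvDup_count (s : List Int) (v : Int) : (pvDup s).count v = 2 * s.count v := by
  induction s with
  | nil => simp [pvDup]
  | cons a t ih =>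
    simp only [pvDup, List.flatMap_cons] at *
    by_cases h : a = v <;> simp [h, ih] <;> omega

theorem pvDup_pairwise_le (s : List Int) (h : s.Pairwise (· < ·)) :
    (pvDup s).Pairwise (· ≤ ·) := by
  induction s with
  | nil => simp [pvDup]
  | cons a t ih =>
    rcases List.pairwise_cons.mp h with ⟨ha, ht⟩
    have hm : ∀ x ∈ pvDup t, a ≤ x := by
      intro x hx
      simp only [pvDup, List.mem_flatMap] at hx
      rcases hx with ⟨y, hy, hxy⟩
      have := ha y hy
      simp at hxy
      omega
    simp only [pvDup, List.flatMap_cons]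
    refine List.pairwise_cons.mpr ⟨?_, List.pairwise_cons.mpr ⟨hm, ih ht⟩⟩
    intro x hx
    rcases List.mem_cons.mp hx with h' | h'
    · omega
    · exact hm x h'

theorem pvDedupWhile_two (l : List Int) (c : Int) (f : Nat)
    (hc : l.count c = 2) (hf : 2 ≤ f) : pvDedupWhile f l c = l.erase c := by
  obtain ⟨f', rfl⟩ : ∃ f', f = f' + 2 := ⟨f - 2, by omega⟩
  have hmem : c ∈ l := List.count_pos_iff.mp (by omega)
  have h1 : (PySem.List.remove? l c).getD l = l.erase c := by
    rw [PySem.List.remove?_eq_some_erase l c hmem]; rfl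
  have h2 : (l.erase c).count c = 1 := by
    rw [List.count_erase_self]; omega
  simp [pvDedupWhile, hc, h1, h2]

theorem pvDedupLoop_inv (s : List Int) : ∀ (pre : List Int) (f : Nat),
    (pre ++ s).Nodup → s.length + 1 ≤ f →
    pvDedupLoop f pre.length (pre ++ pvDup s) = pre ++ s := by
  induction s with
  | nil =>
    intro pre f _ hf
    obtain ⟨f', rfl⟩ : ∃ f', f = f' + 1 := ⟨f - 1, by omega⟩
    simp [pvDedupLoop, pvDup]
  | cons c t ih =>
    intro pre f hnd hf
    obtain ⟨f', rfl⟩ : ∃ f', f = f' + 1 := ⟨f - 1, by omega⟩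
    have hl : pre ++ pvDup (c :: t) = pre ++ c :: c :: pvDup t := by
      simp [pvDup]
    have hget : (pre ++ c :: c :: pvDup t)[pre.length]? = some c := by
      rw [List.getElem?_append_right (le_refl _)]
      simp
    have hcpre : c ∉ pre := by
      intro h
      have := List.disjoint_of_nodup_append hnd h
      simp at this
    have hct : c ∉ t := by
      have := (List.nodup_append.mp hnd).2.1
      simp at this
      exact this.1
    have hcount : (pre ++ c :: c :: pvDup t).count c = 2 := by
      have h0 : pre.count c = 0 := List.count_eq_zero.mpr hcpre
      have h1 : (pvDup t).count c = 0 := by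
        rw [pvDup_count, List.count_eq_zero.mpr hct]
      simp [List.count_append, h0, h1]
    have hlen : 2 ≤ (pre ++ c :: c :: pvDup t).length := by
      simp; omega
    have herase : (pre ++ c :: c :: pvDup t).erase c = (pre ++ [c]) ++ pvDup t := by
      rw [List.erase_append_right _ hcpre, List.erase_cons_head]
      simp
    have hstep := pvDedupWhile_two (pre ++ c :: c :: pvDup t) c _ hcount hlen
    have hnd' : ((pre ++ [c]) ++ t).Nodup := by simpa using hnd
    have := ih (pre ++ [c]) f' hnd' (by simp at hf ⊢; omega)
    rw [hl]
    simp only [pvDedupLoop, hget, hstep, herase]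
    have hplen : (pre ++ [c]).length = pre.length + 1 := by simp
    rw [← hplen, this]
    simp

theorem pv_mem_le_getLast (s : List Int) (hs : s.Pairwise (· ≤ ·)) (h : s ≠ []) :
    ∀ x ∈ s, x ≤ s.getLast h := by
  induction s with
  | nil => simp at h
  | cons a t ih =>
    intro x hx
    rcases List.pairwise_cons.mp hs with ⟨ha, ht⟩
    cases t with
    | nil => simp at hx; simp [hx, List.getLast]
    | cons b t' =>
      rw [List.getLast_cons (by simp)]
      rcases List.mem_cons.mp hx with rfl | h'
      · exact le_trans (ha _ (List.getLast_mem _)) (le_refl _)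
      · exact ih ht (by simp) x h'

theorem pv_head_le_mem (s : List Int) (hs : s.Pairwise (· ≤ ·)) (h : s ≠ []) :
    ∀ x ∈ s, s.head h ≤ x := by
  cases s with
  | nil => simp at h
  | cons a t =>
    intro x hx
    rcases List.pairwise_cons.mp hs with ⟨ha, _⟩
    rcases List.mem_cons.mp hx with rfl | h'
    · simp
    · exact ha x h'

theorem pv_last_ge (t : List Int) : ∀ (a : Int), (a :: t).Pairwise (· < ·) →
    a + t.length ≤ (a :: t).getLast (by simp) := by
  induction t with
  | nil => intro a _; simp [List.getLast]
  | cons b t' ih =>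
    intro a h
    rcases List.pairwise_cons.mp h with ⟨ha, ht⟩
    have hab : a < b := ha b (by simp)
    have := ih b ht
    rw [List.getLast_cons (by simp)]
    simp at this ⊢
    omega

theorem pv_consec_iff (t : List Int) : ∀ (a : Int), (a :: t).Pairwise (· < ·) →
    (List.IsChain (fun x y => x + 1 = y) (a :: t) ↔
      (a :: t).getLast (by simp) = a + t.length) := by
  induction t with
  | nil => intro a _; simp [List.getLast]
  | cons b t' ih =>
    intro a h
    rcases List.pairwise_cons.mp h with ⟨ha, ht⟩
    have hab : a < b := ha b (by simp)
    rw [List.isChain_cons_cons, List.getLast_cons (by simp)]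
    rw [ih b ht]
    have hge := pv_last_ge t' b ht
    constructor
    · rintro ⟨h1, h2⟩
      simp at h2 ⊢
      omega
    · intro h1
      simp at h1
      constructor
      · omega
      · omega

theorem pv_range_card (L : List Int) (hL : L ≠ []) (h : L.Pairwise (· < ·)) :
    List.IsChain (fun x y => x + 1 = y) L ↔
      L.getLast hL - L.head hL + 1 = (L.length : Int) := by
  cases L with
  | nil => exact absurd rfl hL
  | cons a t =>
    rw [pv_consec_iff t a h]
    simp only [List.head_cons, List.length_cons]
    have h2 := pv_last_ge t a h
    push_cast
    constructor
    · intro hg; rw [hg]; ring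
    · intro hg; omega

theorem pvDup_length (s : List Int) : (pvDup s).length = 2 * s.length := by
  induction s with
  | nil => simp [pvDup]
  | cons a t ih => simp [pvDup] at ih ⊢; omega

-- ===== VERDICT (by name: the statement is the Claim_ definition above) =====
theorem is_2_l_d_spec : Claim_equal_is_2_l_d := by
  intro cards _
  unfold Spec_is_2_l_d is_2_l_d is_2_l_d_alt
  by_cases h6 : cards.length < 6
  · simp [h6]
  by_cases h2 : cards.length % 2 = 0
  case neg => simp [h6, h2]
  simp only [h6, h2, if_false, ite_not]
  rw [PySem.Dict.foldl_insert_getD_add_one_eq_counter]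
  have hvals : (PySem.Dict.counter cards).values.any (fun v => v != 2) =
      !(cards.all fun card => cards.count card == 2) := by
    have hv : (PySem.Dict.counter cards).values =
        (PySem.Set.ofList cards).map (fun k => ((List.count k cards : Int))) := by
      show (PySem.Dict.counter cards).items.map Prod.snd = _
      rw [PySem.Dict.items_counter]
      simp
    rw [hv]
    apply Bool.coe_iff_coe.mp
    simp only [List.any_map, List.any_eq_true, Bool.not_eq_eq_eq_not, Bool.not_true,
      List.all_eq_false, Function.comp, PySem.Set.mem_ofList, bne_iff_ne, ne_eq, beq_iff_eq]
    constructor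
    · rintro ⟨k, hk, hne⟩
      exact ⟨k, hk, fun h => hne (by rw [h]; rfl)⟩
    · rintro ⟨k, hk, hne⟩
      exact ⟨k, hk, fun h => hne (by exact_mod_cast h)⟩
  by_cases hall : (cards.all fun card => List.count card cards == 2) = true
  case neg =>
    simp [hall, hvals]
  have hallv : ∀ c ∈ cards, List.count c cards = 2 := by
    intro c hc
    have := List.all_eq_true.mp hall c hc
    exact beq_iff_eq.mp this
  -- names for the distinct sorted list
  set K := PySem.Set.ofList cards with hK
  set S := PySem.List.sorted K (fun x => x) with hS
  have hSperm : S.Perm K := PySem.List.sorted_perm K _ _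
  have hstrict : S.Pairwise (· < ·) := PySem.List.sorted_ofList_pairwise_lt cards
  have hSnodup : S.Nodup := hstrict.imp (fun h => ne_of_lt h)
  have hne : cards ≠ [] := by intro h; rw [h] at h6; simp at h6
  have hKne : K ≠ [] := by
    intro h
    obtain ⟨c, hc⟩ := List.exists_mem_of_ne_nil cards hne
    have : c ∈ K := (PySem.Set.mem_ofList cards c).mpr hc
    rw [h] at this; simp at this
  have hSne : S ≠ [] := fun h => hKne ((PySem.List.sorted_eq_nil_iff K _ _).mp h)
  -- A's sorted list is each distinct value doubled
  have hsortcards : PySem.List.sorted cards (fun x => x) = pvDup S := by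
    apply PySem.List.sorted_id_eq_of_perm_of_pairwise
    · apply List.perm_iff_count.mpr
      intro v
      rw [pvDup_count]
      by_cases hv : v ∈ cards
      · have hvS : v ∈ S := (PySem.List.mem_sorted K _ _ v).mpr ((PySem.Set.mem_ofList cards v).mpr hv)
        rw [List.count_eq_one_of_mem hSnodup hvS, hallv v hv]
      · have hvS : v ∉ S := fun h => hv ((PySem.Set.mem_ofList cards v).mp ((PySem.List.mem_sorted K _ _ v).mp h))
        rw [List.count_eq_zero.mpr hvS, List.count_eq_zero.mpr hv]
    · exact pvDup_pairwise_le S hstrict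
  have hdedup : pvDedupLoop ((pvDup S).length + 1) 0 (pvDup S) = S := by
    have h := pvDedupLoop_inv S [] ((pvDup S).length + 1) (by simpa using hSnodup)
      (by rw [pvDup_length]; omega)
    simpa using h
  rw [hsortcards, hdedup, PySem.Dict.keys_counter]
  simp only [hall, hvals, Bool.not_true, Bool.false_eq_true, if_false, decide_false,
    Bool.false_or, bne_self_eq_false]
  -- min / max of the distinct keys are head / last of the sorted distinct list
  have hpwle : S.Pairwise (· ≤ ·) := hstrict.imp le_of_lt
  have hmax : PySem.List.max? K (fun x => x) = some (S.getLast hSne) := by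
    cases hm : PySem.List.max? K (fun x => x) with
    | none => exact absurd ((PySem.List.max?_eq_none_iff K _).mp hm) hKne
    | some m =>
      have h1 : S.getLast hSne ≤ m :=
        PySem.List.max?_isMax hm _ (hSperm.mem_iff.mp (List.getLast_mem hSne))
      have h2 : m ≤ S.getLast hSne :=
        pv_mem_le_getLast S hpwle hSne m (hSperm.mem_iff.mpr (PySem.List.max?_mem hm))
      rw [le_antisymm h2 h1]
  have hmin : PySem.List.min? K (fun x => x) = some (S.head hSne) := by
    cases hm : PySem.List.min? K (fun x => x) with
    | none => exact absurd ((PySem.List.min?_eq_none_iff K _).mp hm) hKne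
    | some m =>
      have h1 : m ≤ S.head hSne :=
        PySem.List.min?_isMin hm _ (hSperm.mem_iff.mp (List.head_mem hSne))
      have h2 : S.head hSne ≤ m :=
        pv_head_le_mem S hpwle hSne m (hSperm.mem_iff.mpr (PySem.List.min?_mem hm))
      rw [le_antisymm h2 h1]
  rw [hmin, hmax]
  have hget : (PySem.List.pyGet? S ((S.length : Int) - 1)).getD 0 = S.getLast hSne := by
    have h1 : 1 ≤ S.length := List.length_pos_iff.mpr hSne
    have h2 : ((S.length : Int) - 1) = ((S.length - 1 : Nat) : Int) := by
      rw [Nat.cast_sub h1]; rfl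
    rw [h2, PySem.List.pyGet?_natCast, List.getElem?_eq_getElem (by omega),
      List.getLast_eq_getElem]
    rfl
  rw [hget]
  have hsize : ((PySem.Dict.counter cards).size : Int) = (S.length : Int) := by
    have h1 : (PySem.Dict.counter cards).size = (PySem.Dict.counter cards).items.length := rfl
    rw [h1, PySem.Dict.items_counter, List.length_map, hSperm.length_eq]
  show (if S.getLast hSne ≥ 15 then false
      else (PySem.List.pyRange 0 ((S.length : Int) - 1)).all fun idx =>
        (PySem.List.pyGet? S idx).getD 0 + 1 == (PySem.List.pyGet? S (idx + 1)).getD 0) =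
    (if S.getLast hSne ≥ 15 then false
      else decide (S.getLast hSne - S.head hSne + 1 = ((PySem.Dict.counter cards).size : Int)))
  rw [hsize]
  split_ifs with h15
  · rfl
  -- the adjacent-increments scan equals the range-cardinality test
  have hlen1 : 1 ≤ S.length := List.length_pos_iff.mpr hSne
  have hpt : ∀ (i : Nat) (hi : i + 1 < S.length),
      (((PySem.List.pyGet? S (i : Int)).getD 0 + 1 ==
        (PySem.List.pyGet? S ((i : Int) + 1)).getD 0) = true ↔
        S[i]'(by omega) + 1 = S[i + 1]'hi) := by
    intro i hi
    have e1 : PySem.List.pyGet? S (i : Int) = some (S[i]'(by omega)) := by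
      rw [PySem.List.pyGet?_natCast, List.getElem?_eq_getElem (by omega)]
    have e2 : ((i : Int) + 1) = ((i + 1 : Nat) : Int) := by push_cast; ring
    have e3 : PySem.List.pyGet? S ((i + 1 : Nat) : Int) = some S[i + 1] := by
      rw [PySem.List.pyGet?_natCast, List.getElem?_eq_getElem hi]
    rw [e1, e2, e3]
    simp
  have hrange : (((PySem.List.pyRange 0 ((S.length : Int) - 1)).all fun idx =>
      (PySem.List.pyGet? S idx).getD 0 + 1 == (PySem.List.pyGet? S (idx + 1)).getD 0) = true) ↔
      List.IsChain (fun x y => x + 1 = y) S := by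
    have h2 : ((S.length : Int) - 1) = ((S.length - 1 : Nat) : Int) := by
      rw [Nat.cast_sub hlen1]; rfl
    rw [h2, PySem.List.pyRange_zero_natCast, List.all_map, List.all_eq_true, List.isChain_iff_getElem]
    constructor
    · intro h i hi
      exact (hpt i hi).mp (h i (List.mem_range.mpr (by omega)))
    · intro h i hi
      have hi' : i + 1 < S.length := by have := List.mem_range.mp hi; omega
      exact (hpt i hi').mpr (h i hi')
  apply Bool.coe_iff_coe.mp
  rw [hrange, decide_eq_true_iff]
  exact pv_range_card S hSne hstrict
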